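-- pv_equiv track=rewrite | github.com/namankvin/Compiler-Error-Explanation-Using-NLP | week12_benchmarking.py | _normalize_counts
-- ===== SOURCE A (Python) =====
-- from typing import Dict
--
-- def _normalize_counts(counts: Dict[str, int], total: int) -> Dict[str, int]:
--     """Clamp counts and rebalance them to sum to total."""
--     normalized = {k: max(0, int(v)) for k, v in counts.items()}
--     delta = total - sum(normalized.values())
--
--     if delta == 0:
--         return normalized
--
--     keys = list(normalized.keys())
--     if delta > 0:
--         index = 0
--         while delta > 0 and keys:
--             key = keys[index % len(keys)]
--             normalized[key] += 1
--             delta -= 1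
--             index += 1
--         return normalized
--
--     # delta < 0: reduce largest buckets first.
--     while delta < 0:
--         key = max(normalized, key=normalized.get)
--         if normalized[key] == 0:
--             break
--         normalized[key] -= 1
--         delta += 1
--
--     return normalized
-- ===== SOURCE B (Python) =====
-- def _normalize_counts(counts, total):
--     """Clamp counts and rebalance them to sum to total.
--
--     Closed-form rebalance: quotient/remainder round-robin for a positive delta,
--     water-level (binary search on the level) for a negative delta."""
--     normalized = {k: max(0, int(v)) for k, v in counts.items()}
--     s = sum(normalized.values())
--     delta = total - s
--     if delta == 0 or not normalized:
--         return normalized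
--     n = len(normalized)
--     if delta > 0:
--         q, r = divmod(delta, n)
--         return {k: v + q + (1 if i < r else 0)
--                 for i, (k, v) in enumerate(normalized.items())}
--     # delta < 0: remove d units from the largest values first (water level).
--     d = min(-delta, s)
--     vals = list(normalized.values())
--     lo, hi = 0, max(vals)
--     while lo < hi:  # least level L with sum(max(0, v - L)) <= d
--         mid = (lo + hi) // 2
--         if sum(v - mid for v in vals if v > mid) <= d:
--             hi = mid
--         else:
--             lo = mid + 1
--     L = lo
--     e = d - sum(v - L for v in vals if v > L)  # first e values >= L drop to L - 1
--     out = {}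
--     for k, v in normalized.items():
--         if v >= L:
--             out[k] = L - 1 if e > 0 else L
--             e -= 1
--         else:
--             out[k] = v
--     return out
-- ===== Notes on version B (the rewrite author's own statement) =====
-- stated objective: faster
-- what changed: Replaces A's one-unit-per-iteration rebalancing loops by closed forms: a positive delta is distributed as quotient+remainder in one pass, and a negative delta is absorbed by a water-level computed by binary search on the level, instead of decrementing the current maximum |delta| times.
import Mathlib
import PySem

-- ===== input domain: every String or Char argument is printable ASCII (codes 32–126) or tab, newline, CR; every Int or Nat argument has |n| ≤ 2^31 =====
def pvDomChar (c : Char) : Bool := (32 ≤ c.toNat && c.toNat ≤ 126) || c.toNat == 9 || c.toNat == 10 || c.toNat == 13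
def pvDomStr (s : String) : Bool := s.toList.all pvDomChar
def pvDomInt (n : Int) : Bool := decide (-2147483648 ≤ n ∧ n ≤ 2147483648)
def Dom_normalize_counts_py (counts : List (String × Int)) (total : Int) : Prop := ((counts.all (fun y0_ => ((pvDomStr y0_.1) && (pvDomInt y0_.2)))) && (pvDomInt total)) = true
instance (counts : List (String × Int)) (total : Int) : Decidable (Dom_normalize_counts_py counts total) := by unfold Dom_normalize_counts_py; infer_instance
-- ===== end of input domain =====

-- B replaces A's unit-step rebalancing loops by closed forms (quotient/remainder
-- distribution for a positive delta, a binary-searched water level for a negative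
-- one); asymptotically faster (O(n log V) vs O(n·|delta|)); return value only.

-- ===== PORT A =====

-- while delta > 0 and keys: normalized[keys[index % len(keys)]] += 1  (fuel = delta)
def pvPosLoopA : PySem.Dict String Int → List String → Nat → Int → PySem.Dict String Int
  | d, _, 0, _ => d
  | d, keys, Nat.succ f, index =>
      match PySem.List.pyGet? keys (PySem.Int.mod index (keys.length : Int)) with
      | none => d
      | some key => pvPosLoopA (d.modify key 0 (· + 1)) keys f (index + 1)

-- while delta < 0: key = max(normalized, key=normalized.get); break if 0; -= 1  (fuel = -delta)
def pvNegLoopA : PySem.Dict String Int → Nat → PySem.Dict String Int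
  | d, 0 => d
  | d, Nat.succ f =>
      match PySem.List.max? d.keys (fun k => d.getD k 0) with
      | none => d   -- max() of an empty dict raises ValueError: excluded by Pre_
      | some key => if d.getD key 0 = 0 then d else pvNegLoopA (d.modify key 0 (· - 1)) f

def normalize_counts_py (counts : List (String × Int)) (total : Int) : List (String × Int) :=
  let normalized := counts.foldl (fun d kv => d.insert kv.1 (max 0 kv.2)) PySem.Dict.empty
  let delta := total - normalized.values.sum
  if delta = 0 then normalized.items
  else if 0 < delta then
    let keys := normalized.keys
    if keys = [] then normalized.items
    else (pvPosLoopA normalized keys delta.toNat 0).items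
  else (pvNegLoopA normalized (-delta).toNat).items

-- ===== PORT B =====

-- sum(v - L for v in vals if v > L)
def pvFSum (vals : List Int) (L : Int) : Int :=
  ((vals.filter (fun v => L < v)).map (fun v => v - L)).sum

-- binary search for the least level L in [lo, hi] with pvFSum vals L <= dd
def pvBSearch (vals : List Int) (dd lo hi : Int) : Int :=
  if h : lo < hi then
    let mid := PySem.Int.floordiv (lo + hi) 2
    if pvFSum vals mid ≤ dd then pvBSearch vals dd lo mid
    else pvBSearch vals dd (mid + 1) hi
  else lo
termination_by (hi - lo).toNat
decreasing_by
  · have h1 := PySem.Int.floordiv_two_mid_bounds (le_of_lt h)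
    have h2 : PySem.Int.floordiv (lo + hi) 2 < hi :=
      (PySem.Int.floordiv_lt_iff_lt_mul (by omega)).mpr (by omega)
    omega
  · have h1 := PySem.Int.floordiv_two_mid_bounds (le_of_lt h)
    have h2 : PySem.Int.floordiv (lo + hi) 2 < hi :=
      (PySem.Int.floordiv_lt_iff_lt_mul (by omega)).mpr (by omega)
    omega

-- out[k] = L - 1 if e > 0 else L  (for v >= L, e counting down), else v
def pvAssign : List (String × Int) → Int → Int → List (String × Int)
  | [], _, _ => []
  | (k, v) :: t, L, e =>
      if L ≤ v then (k, if 0 < e then L - 1 else L) :: pvAssign t L (e - 1)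
      else (k, v) :: pvAssign t L e

def normalize_counts_py_alt (counts : List (String × Int)) (total : Int) : List (String × Int) :=
  let normalized := counts.foldl (fun d kv => d.insert kv.1 (max 0 kv.2)) PySem.Dict.empty
  let s := normalized.values.sum
  let delta := total - s
  if delta = 0 ∨ normalized.items = [] then normalized.items
  else if 0 < delta then
    let n : Int := (normalized.size : Int)
    let q := PySem.Int.floordiv delta n
    let r := PySem.Int.mod delta n
    normalized.items.zipIdx.map (fun p => (p.1.1, p.1.2 + q + if (p.2 : Int) < r then 1 else 0))
  else
    match normalized.values with
    | [] => normalized.items   -- unreachable: the dict is nonempty here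
    | v0 :: vt =>
      let dd := min (-delta) s
      let L := pvBSearch (v0 :: vt) dd 0 (vt.foldl max v0)
      let e := dd - pvFSum (v0 :: vt) L
      pvAssign normalized.items L e

-- ===== PRECONDITION & SPEC =====
-- Pre_ excludes only the inputs where A raises: an empty dict with total < 0
-- (max() of an empty sequence is a ValueError).
def Pre_normalize_counts_py (counts : List (String × Int)) (total : Int) : Prop :=
  counts = [] → 0 ≤ total
instance (counts : List (String × Int)) (total : Int) : Decidable (Pre_normalize_counts_py counts total) := by unfold Pre_normalize_counts_py; infer_instance

def pvWitness_normalize_counts_py : (List (String × Int)) × Int := ([("a", 1), ("b", 5)], 3)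

def Spec_normalize_counts_py (counts : List (String × Int)) (total : Int) (out : List (String × Int)) : Prop := out = normalize_counts_py_alt counts total
instance (counts : List (String × Int)) (total : Int) (out : List (String × Int)) : Decidable (Spec_normalize_counts_py counts total out) := by unfold Spec_normalize_counts_py; infer_instance

-- ===== CLAIM (what is proved, stated in full; the proofs are below) =====
def Claim_equal_normalize_counts_py : Prop := ∀ (counts : List (String × Int)) (total : Int), Dom_normalize_counts_py counts total → Pre_normalize_counts_py counts total → Spec_normalize_counts_py counts total (normalize_counts_py counts total)

-- ===== LEMMAS AND PROOFS =====

-- ---------- generic facts about the clamped dict ----------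

theorem pv_clamp_nodup (counts : List (String × Int)) :
    (counts.foldl (fun d kv => d.insert kv.1 (max 0 kv.2)) PySem.Dict.empty).keys.Nodup :=
  PySem.Dict.nodup_keys_foldl_insert_key counts Prod.fst (fun _ kv => max 0 kv.2)
    PySem.Dict.empty (by simp [PySem.Dict.keys_empty])

theorem pv_clamp_nonneg (counts : List (String × Int)) :
    ∀ p ∈ (counts.foldl (fun d kv => d.insert kv.1 (max 0 kv.2)) PySem.Dict.empty).items,
      0 ≤ p.2 := by
  suffices h : ∀ (l : List (String × Int)) (d : PySem.Dict String Int),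
      (∀ v ∈ d.values, 0 ≤ v) →
      ∀ v ∈ (l.foldl (fun d kv => d.insert kv.1 (max 0 kv.2)) d).values, 0 ≤ v by
    intro p hp
    exact h counts PySem.Dict.empty (by intro v hv; simp [PySem.Dict.empty, PySem.Dict.values] at hv)
      p.2 (List.mem_map_of_mem hp)
  intro l
  induction l with
  | nil => intro d hd; simpa using hd
  | cons c t ih =>
    intro d hd v hv
    refine ih _ ?_ v hv
    intro w hw
    rcases PySem.Dict.mem_values_insert d c.1 (max 0 c.2) w hw with h | h
    · omega
    · exact hd w h


theorem pv_clamp_ne_nil (counts : List (String × Int)) (h : counts ≠ []) :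
    (counts.foldl (fun d kv => d.insert kv.1 (max 0 kv.2)) PySem.Dict.empty).items ≠ [] := by
  have hins : ∀ (d : PySem.Dict String Int) (k : String) (v : Int),
      d.items ≠ [] → (d.insert k v).items ≠ [] := by
    intro d k v hne
    by_cases hc : d.contains k = true <;>
      simp [PySem.Dict.insert, hc, hne]
  have haux : ∀ (l : List (String × Int)) (d : PySem.Dict String Int), d.items ≠ [] →
      (l.foldl (fun d kv => d.insert kv.1 (max 0 kv.2)) d).items ≠ [] := by
    intro l
    induction l with
    | nil => intro d hd; simpa using hd
    | cons c t ih => intro d hd; exact ih _ (hins _ _ _ hd)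
  rcases counts with _ | ⟨c, t⟩
  · exact absurd rfl h
  · simp only [List.foldl_cons]
    exact haux t _ (by simp [PySem.Dict.insert, PySem.Dict.contains_empty, PySem.Dict.empty])


-- ---------- positive branch ----------

def pvBumpF : Nat → List (String × Int) → List (String × Int)
  | 0, xs => xs
  | _+1, [] => []
  | r+1, (k, v) :: t => (k, v + 1) :: pvBumpF r t

theorem pv_map_replace (xs : List (String × Int)) (j : Nat) (hj : j < xs.length)
    (hnd : (xs.map Prod.fst).Nodup) (w : Int) :
    xs.map (fun p => if p.1 == xs[j].1 then (xs[j].1, w) else p) = xs.set j (xs[j].1, w) := by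
  induction xs generalizing j with
  | nil => simp at hj
  | cons x t ih =>
    have hnotin : x.1 ∉ t.map Prod.fst := (List.nodup_cons.mp (by simpa using hnd)).1
    have hndt : (t.map Prod.fst).Nodup := (List.nodup_cons.mp (by simpa using hnd)).2
    rcases j with _ | j
    · rw [List.set_cons_zero]
      simp only [List.getElem_cons_zero, List.map_cons]
      rw [if_pos (by simp)]
      congr 1
      refine (List.map_congr_left ?_).trans (List.map_id t)
      intro p hp
      have hne : p.1 ≠ x.1 := by
        intro h
        have hin : p.1 ∈ t.map Prod.fst := List.mem_map_of_mem hp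
        rw [h] at hin
        exact hnotin hin
      simp [hne]
    · rw [List.set_cons_succ]
      simp only [List.getElem_cons_succ, List.map_cons]
      have hjt : j < t.length := by simpa using hj
      have hne : x.1 ≠ t[j].1 := by
        intro h
        have hin : t[j].1 ∈ t.map Prod.fst := List.mem_map_of_mem (List.getElem_mem hjt)
        rw [← h] at hin
        exact hnotin hin
      rw [if_neg (by simpa using hne)]
      congr 1
      exact ih j hjt hndt


theorem pv_modify_items (xs : List (String × Int)) (j : Nat) (hj : j < xs.length)
    (hnd : (xs.map Prod.fst).Nodup) (f : Int → Int) :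
    ((PySem.Dict.mk xs).modify xs[j].1 0 f).items = xs.set j (xs[j].1, f xs[j].2) := by
  have hmem : (xs[j].1, xs[j].2) ∈ xs := by
    simpa using List.getElem_mem hj
  have hc : (PySem.Dict.mk xs).contains xs[j].1 = true := by
    rw [PySem.Dict.contains_iff_mem_keys]
    exact List.mem_map_of_mem (List.getElem_mem hj)
  have hgd : (PySem.Dict.mk xs).getD xs[j].1 0 = xs[j].2 :=
    PySem.Dict.getD_of_mem_items _ hmem (by simpa using hnd) 0
  show ((PySem.Dict.mk xs).insert xs[j].1 (f ((PySem.Dict.mk xs).getD xs[j].1 0))).items = _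
  rw [hgd, PySem.Dict.items_insert_of_contains _ _ hc]
  exact pv_map_replace xs j hj hnd (f xs[j].2)


theorem pv_pyGet_of_range (xs : List String) (i : Int) (h0 : 0 ≤ i) (h1 : i < xs.length) :
    PySem.List.pyGet? xs i = some (xs[i.toNat]'(by omega)) := by
  have hn : i.toNat < xs.length := by omega
  simp [PySem.List.pyGet?, PySem.List.pyIdx?, h0, h1, List.getElem?_eq_getElem, hn]


theorem pv_mod_val (i n t : Int) (hn : 0 < n) (h : PySem.Int.mod i n = t) (a : Int)
    (h0 : 0 ≤ t + a) (h1 : t + a < n) : PySem.Int.mod (i + a) n = t + a := by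
  rw [PySem.Int.mod_eq_emod_of_pos hn] at h ⊢
  have hd := Int.ediv_add_emod i n
  have h2 : i + a = t + a + n * (i / n) := by omega
  rw [h2, Int.add_mul_emod_self_left]
  exact Int.emod_eq_of_lt h0 h1


theorem pvPosLoopA_succ (d : PySem.Dict String Int) (keys : List String) (f : Nat)
    (i : Int) (key : String)
    (h : PySem.List.pyGet? keys (PySem.Int.mod i (keys.length : Int)) = some key) :
    pvPosLoopA d keys (f + 1) i = pvPosLoopA (d.modify key 0 (· + 1)) keys f (i + 1) := by
  rw [pvPosLoopA, h]

theorem pv_pyGet_mod (keys : List String) (hk : keys ≠ []) (i : Int) :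
    PySem.List.pyGet? keys (PySem.Int.mod i (keys.length : Int))
      = some (keys[(PySem.Int.mod i (keys.length : Int)).toNat]'(by
          have hn : (0:Int) < keys.length := by
            have := List.length_pos_of_ne_nil hk
            omega
          have := PySem.Int.mod_nonneg i hn
          have := PySem.Int.mod_lt i hn
          omega)) := by
  have hn : (0:Int) < keys.length := by
    have := List.length_pos_of_ne_nil hk
    omega
  exact pv_pyGet_of_range keys _ (PySem.Int.mod_nonneg i hn) (PySem.Int.mod_lt i hn)

theorem pvPosLoopA_add (keys : List String) (hk : keys ≠ []) :
    ∀ (a b : Nat) (d : PySem.Dict String Int) (i : Int), 0 ≤ i →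
    pvPosLoopA d keys (a + b) i = pvPosLoopA (pvPosLoopA d keys a i) keys b (i + a) := by
  intro a
  induction a with
  | zero =>
    intro b d i hi
    have h0 : i + ((0:Nat):Int) = i := by push_cast; ring
    rw [Nat.zero_add, h0]
    rfl
  | succ a ih =>
    intro b d i hi
    have hget := pv_pyGet_mod keys hk i
    rw [show a + 1 + b = (a + b) + 1 from by omega]
    rw [pvPosLoopA_succ _ _ _ _ _ hget, pvPosLoopA_succ _ _ _ _ _ hget]
    rw [ih b _ (i + 1) (by omega)]
    congr 1
    push_cast
    ring

theorem pvPosLoopA_keys (keys : List String) :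
    ∀ (f : Nat) (d : PySem.Dict String Int) (i : Int), d.keys = keys →
      (pvPosLoopA d keys f i).keys = keys := by
  intro f
  induction f with
  | zero => intro d i hdk; exact hdk
  | succ f ih =>
    intro d i hdk
    by_cases hk : keys = []
    · subst hk
      have hnone : PySem.List.pyGet? ([] : List String)
          (PySem.Int.mod i ((([] : List String).length : Nat) : Int)) = none := by
        rcases h : PySem.List.pyIdx? ([] : List String).length
            (PySem.Int.mod i ((([] : List String).length : Nat) : Int)) with _ | k <;>
          simp [PySem.List.pyGet?, h]
      rw [pvPosLoopA, hnone]
      exact hdk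
    · have hget := pv_pyGet_mod keys hk i
      rw [pvPosLoopA_succ _ _ _ _ _ hget]
      have hcont : d.contains (keys[(PySem.Int.mod i (keys.length : Int)).toNat]'(by
          have hn : (0:Int) < keys.length := by
            have := List.length_pos_of_ne_nil hk
            omega
          have := PySem.Int.mod_nonneg i hn
          have := PySem.Int.mod_lt i hn
          omega)) = true := by
        rw [PySem.Dict.contains_iff_mem_keys, hdk]
        exact List.getElem_mem _
      refine ih _ (i + 1) ?_
      rw [PySem.Dict.keys_modify, PySem.Dict.keys_insert_of_contains _ _ hcont]
      exact hdk

theorem pvBumpF_cons (r : Nat) (p : String × Int) (t : List (String × Int)) :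
    pvBumpF (r + 1) (p :: t) = (p.1, p.2 + 1) :: pvBumpF r t := by
  obtain ⟨k, v⟩ := p
  rfl

theorem pvBumpF_length : ∀ (xs : List (String × Int)) (r : Nat),
    (pvBumpF r xs).length = xs.length := by
  intro xs
  induction xs with
  | nil => intro r; cases r <;> rfl
  | cons x t ih =>
    intro r
    cases r with
    | zero => rfl
    | succ r => rw [pvBumpF_cons]; simp [ih]

theorem pvBumpF_getElem : ∀ (xs : List (String × Int)) (r : Nat) (j : Nat)
    (hj : j < xs.length),
    (pvBumpF r xs)[j]'(by rw [pvBumpF_length]; exact hj)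
      = if j < r then (xs[j].1, xs[j].2 + 1) else xs[j] := by
  intro xs
  induction xs with
  | nil => intro r j hj; simp at hj
  | cons x t ih =>
    intro r j hj
    cases r with
    | zero => rw [if_neg (by omega)]; rfl
    | succ r =>
      simp only [pvBumpF_cons]
      cases j with
      | zero => simp
      | succ j =>
        simp only [List.getElem_cons_succ]
        rw [ih r j (by simpa using hj)]
        by_cases h : j < r
        · rw [if_pos h, if_pos (by omega)]
        · rw [if_neg h, if_neg (by omega)]

theorem pvPosLoopA_seg (keys : List String) (hnd : keys.Nodup) :
    ∀ (r t : Nat) (d : PySem.Dict String Int) (i : Int),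
    d.keys = keys → 0 ≤ i → PySem.Int.mod i (keys.length : Int) = (t : Int) →
    t + r ≤ keys.length →
    (pvPosLoopA d keys r i).items = d.items.take t ++ pvBumpF r (d.items.drop t) := by
  intro r
  induction r with
  | zero =>
    intro t d i _ _ _ _
    show d.items = _
    rw [show pvBumpF 0 (d.items.drop t) = d.items.drop t from rfl, List.take_append_drop]
  | succ r ih =>
    intro t d i hdk hi hmod hle
    have hk : keys ≠ [] := by
      intro h
      rw [h] at hle
      simp at hle
    have hn : (0:Int) < keys.length := by
      have := List.length_pos_of_ne_nil hk
      omega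
    have htlt : t < keys.length := by omega
    have hkeq : keys = d.items.map Prod.fst := by rw [← hdk]; rfl
    have hxlt : t < d.items.length := by
      rw [hkeq] at htlt
      simpa using htlt
    have hnd' : (d.items.map Prod.fst).Nodup := by rw [← hkeq]; exact hnd
    have hkey : keys[t]'htlt = (d.items[t]'hxlt).1 := by
      have h1 := List.getElem_of_eq hkeq htlt
      simpa using h1
    have hget : PySem.List.pyGet? keys (PySem.Int.mod i (keys.length : Int))
        = some ((d.items[t]'hxlt).1) := by
      have h1 := pv_pyGet_mod keys hk i
      simp only [hmod, Int.toNat_natCast] at h1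
      rw [hmod, h1, hkey]
    have hmodi : (d.modify ((d.items[t]'hxlt).1) 0 (· + 1)).items
        = d.items.set t ((d.items[t]'hxlt).1, (d.items[t]'hxlt).2 + 1) :=
      pv_modify_items d.items t hxlt hnd' (· + 1)
    rw [pvPosLoopA_succ _ _ _ _ _ hget]
    rcases r with _ | r'
    · show (d.modify ((d.items[t]'hxlt).1) 0 (· + 1)).items = _
      rw [hmodi]
      rw [List.set_eq_take_append_cons_drop, if_pos hxlt]
      rw [← List.getElem_cons_drop hxlt, pvBumpF_cons]
      rfl
    · have hkeys' : (d.modify ((d.items[t]'hxlt).1) 0 (· + 1)).keys = keys := by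
        show ((d.modify ((d.items[t]'hxlt).1) 0 (· + 1)).items).map Prod.fst = keys
        rw [hmodi, List.map_set]
        have : ((d.items.map Prod.fst).set t ((d.items[t]'hxlt).1))
            = (d.items.map Prod.fst) := by
          have hg : (d.items.map Prod.fst)[t]'(by simpa using hxlt) = (d.items[t]'hxlt).1 := by
            simp
          rw [← hg]
          exact List.set_getElem_self _
        rw [this, ← hkeq]
      have hmod1 : PySem.Int.mod (i + 1) (keys.length : Int) = ((t + 1 : Nat) : Int) := by
        have h2 := pv_mod_val i (keys.length : Int) (t : Int) hn hmod 1 (by omega)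
          (by push_cast; omega)
        push_cast
        exact h2
      have hrec := ih (t + 1) _ (i + 1) hkeys' (by omega) hmod1 (by omega)
      rw [hrec, hmodi]
      have hdrop : (d.items.set t ((d.items[t]'hxlt).1, (d.items[t]'hxlt).2 + 1)).drop (t+1)
          = d.items.drop (t+1) := by
        rw [List.drop_set, if_pos (by omega)]
      have htake : (d.items.set t ((d.items[t]'hxlt).1, (d.items[t]'hxlt).2 + 1)).take (t+1)
          = d.items.take t ++ [((d.items[t]'hxlt).1, (d.items[t]'hxlt).2 + 1)] := by
        rw [List.set_eq_take_append_cons_drop, if_pos hxlt, List.take_append]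
        have hlen : (d.items.take t).length = t := by
          rw [List.length_take]
          omega
        rw [List.take_of_length_le (by omega), hlen]
        simp
      rw [hdrop, htake]
      rw [← List.getElem_cons_drop hxlt, pvBumpF_cons]
      simp

theorem pvBumpF_all (xs : List (String × Int)) :
    pvBumpF xs.length xs = xs.map (fun p => (p.1, p.2 + 1)) := by
  induction xs with
  | nil => rfl
  | cons x t ih =>
    obtain ⟨k, v⟩ := x
    show pvBumpF (t.length + 1) ((k, v) :: t) = _
    rw [pvBumpF, ih]
    rfl


theorem pvPosLoopA_main (keys : List String) (hnd : keys.Nodup) (hk : keys ≠ []) :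
    ∀ (Q R : Nat), R < keys.length →
    ∀ (d : PySem.Dict String Int) (i : Int), d.keys = keys → 0 ≤ i →
      PySem.Int.mod i (keys.length : Int) = 0 →
    (pvPosLoopA d keys (Q * keys.length + R) i).items
      = d.items.zipIdx.map
          (fun p => (p.1.1, p.1.2 + (Q : Int) + if (p.2 : Int) < (R : Int) then 1 else 0)) := by
  intro Q
  induction Q with
  | zero =>
    intro R hR d i hdk hi hmod
    rw [Nat.zero_mul, Nat.zero_add]
    rw [pvPosLoopA_seg keys hnd R 0 d i hdk hi (by simpa using hmod) (by omega)]
    simp only [List.take_zero, List.drop_zero, List.nil_append]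
    apply List.ext_getElem
    · rw [pvBumpF_length]
      simp
    · intro j h1 h2
      rw [pvBumpF_getElem d.items R j (by rw [pvBumpF_length] at h1; exact h1)]
      have hj : j < d.items.length := by rw [pvBumpF_length] at h1; exact h1
      have hz : j < d.items.zipIdx.length := by simpa using hj
      rw [List.getElem_map, List.getElem_zipIdx]
      by_cases hjR : j < R
      · rw [if_pos hjR, if_pos (by push_cast; omega)]
        refine Prod.ext rfl ?_
        push_cast
        ring
      · rw [if_neg hjR, if_neg (by push_cast; omega)]
        refine Prod.ext rfl ?_
        push_cast
        ring
  | succ Q ihQ =>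
    intro R hR d i hdk hi hmod
    have hk : keys ≠ [] := by
      intro h
      rw [h] at hR
      simp at hR
    have hn : (0:Int) < keys.length := by
      have := List.length_pos_of_ne_nil hk
      omega
    rw [show (Q + 1) * keys.length + R = keys.length + (Q * keys.length + R) from by ring]
    rw [pvPosLoopA_add keys hk _ _ d i hi]
    have hinner := pvPosLoopA_seg keys hnd keys.length 0 d i hdk hi (by simpa using hmod)
      (by omega)
    simp only [List.take_zero, List.drop_zero, List.nil_append] at hinner
    have hkeys2 := pvPosLoopA_keys keys keys.length d i hdk
    have hmod2 : PySem.Int.mod (i + (keys.length : Int)) (keys.length : Int) = 0 := by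
      rw [PySem.Int.mod_eq_emod_of_pos hn] at hmod ⊢
      rw [show i + (keys.length : Int) = i + (keys.length : Int) * 1 from by ring,
        Int.add_mul_emod_self_left]
      exact hmod
    rw [ihQ R hR (pvPosLoopA d keys keys.length i) (i + keys.length) hkeys2 (by omega) hmod2]
    rw [hinner]
    have hlen : keys.length = d.items.length := by
      rw [← hdk]
      exact List.length_map ..
    rw [hlen, pvBumpF_all, List.zipIdx_map, List.map_map]
    apply List.map_congr_left
    intro p hp
    obtain ⟨⟨k, v⟩, idx⟩ := p
    simp only [Function.comp_apply, Prod.map_apply, id_eq]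
    refine Prod.ext rfl ?_
    show v + 1 + (Q : Int) + _ = v + ((Q+1 : Nat) : Int) + _
    push_cast
    ring


-- ---------- negative branch: first-max machinery ----------

def pvPick (b y : String × Int) : String × Int := if b.2 < y.2 then y else b

def pvFM : List (String × Int) → String × Int
  | [] => ("", 0)
  | x :: t => t.foldl pvPick x

def pvMaxSnd : List (String × Int) → Int
  | [] => 0
  | x :: t => t.foldl (fun b y => max b y.2) x.2

def pvDecF : Int → List (String × Int) → List (String × Int)
  | _, [] => []
  | m, (k, v) :: t => if v = m then (k, v - 1) :: t else (k, v) :: pvDecF m t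

def pvNegItems : List (String × Int) → Nat → List (String × Int)
  | xs, 0 => xs
  | xs, Nat.succ f =>
      if xs = [] then xs
      else if pvMaxSnd xs = 0 then xs
      else pvNegItems (pvDecF (pvMaxSnd xs) xs) f

def pvIter : List (String × Int) → Nat → List (String × Int)
  | xs, 0 => xs
  | xs, Nat.succ f => pvIter (pvDecF (pvMaxSnd xs) xs) f

theorem pv_foldl_pick_mem : ∀ (t : List (String × Int)) (b : String × Int),
    t.foldl pvPick b = b ∨ t.foldl pvPick b ∈ t := by
  intro t
  induction t with
  | nil => intro b; left; rfl
  | cons y t ih =>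
    intro b
    rcases ih (pvPick b y) with h | h
    · rw [List.foldl_cons, h]
      unfold pvPick
      split
      · right; exact List.mem_cons_self ..
      · left; rfl
    · right; exact List.mem_cons_of_mem _ h


theorem pv_le_foldl_pick : ∀ (t : List (String × Int)) (b : String × Int),
    b.2 ≤ (t.foldl pvPick b).2 ∧ ∀ y ∈ t, y.2 ≤ (t.foldl pvPick b).2 := by
  intro t
  induction t with
  | nil => intro b; exact ⟨le_refl _, by simp⟩
  | cons y t ih =>
    intro b
    obtain ⟨h1, h2⟩ := ih (pvPick b y)
    have hb : b.2 ≤ (pvPick b y).2 := by unfold pvPick; split <;> omega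
    have hy : y.2 ≤ (pvPick b y).2 := by unfold pvPick; split <;> omega
    refine ⟨le_trans hb h1, ?_⟩
    intro z hz
    rcases List.mem_cons.mp hz with rfl | hz
    · exact le_trans hy h1
    · exact h2 z hz


theorem pvFM_mem (xs : List (String × Int)) (h : xs ≠ []) : pvFM xs ∈ xs := by
  rcases xs with _ | ⟨x, t⟩
  · exact absurd rfl h
  · rcases pv_foldl_pick_mem t x with h1 | h1
    · rw [pvFM, h1]; exact List.mem_cons_self ..
    · rw [pvFM]; exact List.mem_cons_of_mem _ h1


theorem pvFM_max (xs : List (String × Int)) : ∀ p ∈ xs, p.2 ≤ (pvFM xs).2 := by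
  rcases xs with _ | ⟨x, t⟩
  · intro p hp; simp at hp
  · intro p hp
    obtain ⟨h1, h2⟩ := pv_le_foldl_pick t x
    rcases List.mem_cons.mp hp with rfl | hp
    · exact h1
    · exact h2 p hp


theorem pvMaxSnd_eq_FM (xs : List (String × Int)) (h : xs ≠ []) :
    pvMaxSnd xs = (pvFM xs).2 := by
  rcases xs with _ | ⟨x, t⟩
  · exact absurd rfl h
  · show t.foldl (fun b y => max b y.2) x.2 = (t.foldl pvPick x).2
    clear h
    induction t generalizing x with
    | nil => rfl
    | cons y t ih =>
      rw [List.foldl_cons, List.foldl_cons]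
      have : max x.2 y.2 = (pvPick x y).2 := by unfold pvPick; split <;> omega
      rw [this, ih]


theorem pv_foldl_pick_self : ∀ (t : List (String × Int)) (b : String × Int),
    (t.foldl pvPick b).2 ≤ b.2 → t.foldl pvPick b = b := by
  intro t
  induction t with
  | nil => intro b _; rfl
  | cons y t ih =>
    intro b hle
    rw [List.foldl_cons] at hle ⊢
    by_cases hby : b.2 < y.2
    · exfalso
      have h1 := (pv_le_foldl_pick t (pvPick b y)).1
      have h2 : (pvPick b y).2 = y.2 := by unfold pvPick; rw [if_pos hby]
      omega
    · have heq : pvPick b y = b := by unfold pvPick; rw [if_neg hby]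
      rw [heq] at hle ⊢
      exact ih b hle

theorem pv_foldl_pick_congr : ∀ (t : List (String × Int)) (b c : String × Int),
    b.2 ≤ c.2 → (∃ p ∈ t, c.2 < p.2) → t.foldl pvPick b = t.foldl pvPick c := by
  intro t
  induction t with
  | nil => intro b c _ h; simp at h
  | cons y t ih =>
    intro b c hbc hex
    rw [List.foldl_cons, List.foldl_cons]
    by_cases hcy : c.2 < y.2
    · have hbyy : b.2 < y.2 := by omega
      unfold pvPick
      rw [if_pos hbyy, if_pos hcy]
    · have hc : pvPick c y = c := by unfold pvPick; rw [if_neg hcy]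
      rw [hc]
      have hb2 : (pvPick b y).2 ≤ c.2 := by unfold pvPick; split <;> omega
      rcases hex with ⟨p, hp, hcp⟩
      rcases List.mem_cons.mp hp with rfl | hp
      · omega
      · exact ih (pvPick b y) c hb2 ⟨p, hp, hcp⟩


theorem pvFM_cons_of_lt (x : String × Int) (t : List (String × Int))
    (h : x.2 < (pvFM (x :: t)).2) : t ≠ [] ∧ pvFM (x :: t) = pvFM t := by
  have hne : t ≠ [] := by
    rintro rfl
    simp [pvFM] at h
  refine ⟨hne, ?_⟩
  rcases t with _ | ⟨y, t'⟩
  · exact absurd rfl hne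
  · show (y :: t').foldl pvPick x = t'.foldl pvPick y
    rw [List.foldl_cons]
    by_cases hxy : x.2 < y.2
    · rw [show pvPick x y = y by unfold pvPick; rw [if_pos hxy]]
    · rw [show pvPick x y = x by unfold pvPick; rw [if_neg hxy]]
      have hm := pvFM_mem (x :: y :: t') (by simp)
      have hx2 : x.2 < (pvFM (x :: y :: t')).2 := h
      rcases List.mem_cons.mp hm with he | hm'
      · rw [he] at hx2; omega
      rcases List.mem_cons.mp hm' with he | hm''
      · rw [he] at hx2; omega
      · exact (pv_foldl_pick_congr t' y x (by omega) ⟨pvFM (x :: y :: t'), hm'', by omega⟩).symm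


theorem pv_max?_fold (g : String → Int) : ∀ (t : List (String × Int)) (b : String × Int),
    g b.1 = b.2 → (∀ p ∈ t, g p.1 = p.2) →
    PySem.List.max? (b.1 :: t.map Prod.fst) g = some ((t.foldl pvPick b).1) := by
  intro t
  induction t with
  | nil => intro b _ _; rfl
  | cons y t ih =>
    intro b hgb hgt
    have hgy : g y.1 = y.2 := hgt y List.mem_cons_self
    have key : PySem.List.max? (b.1 :: y.1 :: t.map Prod.fst) g
        = PySem.List.max? ((pvPick b y).1 :: t.map Prod.fst) g := by
      unfold PySem.List.max?
      rw [List.foldl_cons, List.foldl_cons, List.foldl_cons]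
      congr 1
      show (if g b.1 < g y.1 then some y.1 else some b.1) = some (pvPick b y).1
      rw [hgb, hgy]
      unfold pvPick
      by_cases h : b.2 < y.2 <;> simp [h]
    rw [List.map_cons, key]
    have hgp : g (pvPick b y).1 = (pvPick b y).2 := by
      unfold pvPick; split
      · exact hgy
      · exact hgb
    rw [ih (pvPick b y) hgp (fun p hp => hgt p (List.mem_cons_of_mem _ hp))]
    rfl

theorem pv_max?_keys (xs : List (String × Int)) (hnd : (xs.map Prod.fst).Nodup)
    (hne : xs ≠ []) :
    PySem.List.max? (xs.map Prod.fst) (fun k => (PySem.Dict.mk xs).getD k 0)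
      = some (pvFM xs).1 := by
  have hg : ∀ p ∈ xs, (PySem.Dict.mk xs).getD p.1 0 = p.2 := by
    intro p hp
    exact PySem.Dict.getD_of_mem_items _ (by simpa using hp) (by simpa using hnd) 0
  rcases xs with _ | ⟨x, t⟩
  · exact absurd rfl hne
  · rw [List.map_cons]
    exact pv_max?_fold (fun k => (PySem.Dict.mk (x :: t)).getD k 0) t x
      (hg x List.mem_cons_self) (fun p hp => hg p (List.mem_cons_of_mem _ hp))

theorem pv_map_dec (xs : List (String × Int)) (hnd : (xs.map Prod.fst).Nodup)
    (hne : xs ≠ []) :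
    xs.map (fun p => if p.1 == (pvFM xs).1 then ((pvFM xs).1, (pvFM xs).2 - 1) else p)
      = pvDecF (pvFM xs).2 xs := by
  induction xs with
  | nil => rfl
  | cons x t ih =>
    have hnotin : x.1 ∉ t.map Prod.fst := by
      rw [List.map_cons] at hnd
      exact (List.nodup_cons.mp hnd).1
    have hndt : (t.map Prod.fst).Nodup := by
      rw [List.map_cons] at hnd
      exact (List.nodup_cons.mp hnd).2
    by_cases hx : x.2 = (pvFM (x :: t)).2
    · have hx' : (t.foldl pvPick x).2 ≤ x.2 := by
        rw [show t.foldl pvPick x = pvFM (x :: t) from rfl]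
        omega
      have hfm : pvFM (x :: t) = x := pv_foldl_pick_self t x hx'
      rw [hfm]
      obtain ⟨k, v⟩ := x
      simp only [List.map_cons, beq_self_eq_true, if_pos, pvDecF, if_pos rfl]
      congr 1
      refine (List.map_congr_left ?_).trans (List.map_id t)
      intro p hp
      have : p.1 ≠ k := by
        intro hpk
        have hin : p.1 ∈ t.map Prod.fst := List.mem_map_of_mem hp
        rw [hpk] at hin
        exact hnotin hin
      simp [this]
    · have hlt : x.2 < (pvFM (x :: t)).2 := by
        have := pvFM_max (x :: t) x List.mem_cons_self
        omega
      obtain ⟨htne, hfm⟩ := pvFM_cons_of_lt x t hlt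
      rw [hfm]
      have hk : x.1 ≠ (pvFM t).1 := by
        intro hpk
        have hin : (pvFM t).1 ∈ t.map Prod.fst := List.mem_map_of_mem (pvFM_mem t htne)
        rw [← hpk] at hin
        exact hnotin hin
      obtain ⟨k, v⟩ := x
      have hv : v ≠ (pvFM t).2 := by
        rw [hfm] at hx hlt
        simp only at hx hlt
        omega
      simp only [List.map_cons, pvDecF, if_neg hv]
      rw [if_neg (by simpa using hk)]
      rw [ih hndt htne]

theorem pv_modify_dec (xs : List (String × Int)) (hnd : (xs.map Prod.fst).Nodup)
    (hne : xs ≠ []) :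
    ((PySem.Dict.mk xs).modify (pvFM xs).1 0 (· - 1)).items = pvDecF (pvFM xs).2 xs := by
  have hc : (PySem.Dict.mk xs).contains (pvFM xs).1 = true := by
    rw [PySem.Dict.contains_iff_mem_keys]
    exact List.mem_map_of_mem (pvFM_mem xs hne)
  have hgd : (PySem.Dict.mk xs).getD (pvFM xs).1 0 = (pvFM xs).2 :=
    PySem.Dict.getD_of_mem_items _ (by simpa using pvFM_mem xs hne) (by simpa using hnd) 0
  show ((PySem.Dict.mk xs).insert (pvFM xs).1 ((PySem.Dict.mk xs).getD (pvFM xs).1 0 - 1)).items = _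
  rw [hgd, PySem.Dict.items_insert_of_contains _ _ hc]
  exact pv_map_dec xs hnd hne


theorem pvNegLoopA_items : ∀ (fuel : Nat) (d : PySem.Dict String Int), d.keys.Nodup →
    (pvNegLoopA d fuel).items = pvNegItems d.items fuel := by
  intro fuel
  induction fuel with
  | zero => intro d _; rfl
  | succ f ih =>
    intro d hnd
    obtain ⟨xs⟩ := d
    by_cases hxs : xs = []
    · subst hxs
      show (pvNegLoopA (PySem.Dict.mk []) (f + 1)).items = pvNegItems [] (f + 1)
      rw [pvNegLoopA, pvNegItems]
      simp [PySem.List.max?, PySem.Dict.keys]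
    · have hnd' : (xs.map Prod.fst).Nodup := by simpa [PySem.Dict.keys] using hnd
      have hmax := pv_max?_keys xs hnd' hxs
      have hgd : (PySem.Dict.mk xs).getD (pvFM xs).1 0 = (pvFM xs).2 :=
        PySem.Dict.getD_of_mem_items _ (by simpa using pvFM_mem xs hxs) (by simpa using hnd) 0
      rw [pvNegLoopA, pvNegItems]
      have hkeys : (PySem.Dict.mk xs).keys = xs.map Prod.fst := rfl
      rw [show (PySem.Dict.mk xs).items = xs from rfl, if_neg hxs, hkeys, hmax]
      simp only [hgd]
      rw [pvMaxSnd_eq_FM xs hxs]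
      by_cases h0 : (pvFM xs).2 = 0
      · rw [if_pos h0, if_pos h0]
      · rw [if_neg h0, if_neg h0]
        have hmod := pv_modify_dec xs hnd' hxs
        have hcont : (PySem.Dict.mk xs).contains (pvFM xs).1 = true := by
          rw [PySem.Dict.contains_iff_mem_keys]
          exact List.mem_map_of_mem (pvFM_mem xs hxs)
        rw [ih _ (by
          rw [PySem.Dict.keys_modify, PySem.Dict.keys_insert_of_contains _ _ hcont]
          exact hnd)]
        rw [hmod]


-- ---------- negative branch: sum / break analysis ----------

theorem pvMaxSnd_ub (xs : List (String × Int)) : ∀ p ∈ xs, p.2 ≤ pvMaxSnd xs := by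
  intro p hp
  rcases xs with _ | ⟨x, t⟩
  · simp at hp
  · rw [pvMaxSnd_eq_FM _ (by simp)]
    exact pvFM_max _ p hp


theorem pvMaxSnd_exists (xs : List (String × Int)) (h : xs ≠ []) :
    ∃ p ∈ xs, p.2 = pvMaxSnd xs := by
  refine ⟨pvFM xs, pvFM_mem xs h, ?_⟩
  rw [pvMaxSnd_eq_FM xs h]


theorem pvDecF_sum (m : Int) : ∀ (xs : List (String × Int)), (∃ p ∈ xs, p.2 = m) →
    ((pvDecF m xs).map Prod.snd).sum = (xs.map Prod.snd).sum - 1 := by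
  intro xs
  induction xs with
  | nil => intro h; simp at h
  | cons x t ih =>
    intro h
    obtain ⟨k, v⟩ := x
    by_cases hv : v = m
    · simp only [pvDecF, if_pos hv, List.map_cons, List.sum_cons]
      omega
    · simp only [pvDecF, if_neg hv, List.map_cons, List.sum_cons]
      have hex : ∃ p ∈ t, p.2 = m := by
        rcases h with ⟨p, hp, hpm⟩
        rcases List.mem_cons.mp hp with rfl | hp
        · exact absurd hpm hv
        · exact ⟨p, hp, hpm⟩
      rw [ih hex]
      omega


theorem pvDecF_nonneg (m : Int) (hm : 0 < m) : ∀ (xs : List (String × Int)),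
    (∀ p ∈ xs, 0 ≤ p.2) → ∀ p ∈ pvDecF m xs, 0 ≤ p.2 := by
  intro xs
  induction xs with
  | nil => intro _ p hp; simp [pvDecF] at hp
  | cons x t ih =>
    intro h0 p hp
    obtain ⟨k, v⟩ := x
    have ht : ∀ p ∈ t, 0 ≤ p.2 := fun q hq => h0 q (List.mem_cons_of_mem _ hq)
    simp only [pvDecF] at hp
    by_cases hv : v = m
    · rw [if_pos hv] at hp
      rcases List.mem_cons.mp hp with rfl | hp
      · simp only; omega
      · exact ht p hp
    · rw [if_neg hv] at hp
      rcases List.mem_cons.mp hp with rfl | hp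
      · exact h0 (k, v) (List.mem_cons_self ..)
      · exact ih ht p hp


theorem pvNegItems_eq_iter : ∀ (fuel : Nat) (xs : List (String × Int)),
    (∀ p ∈ xs, 0 ≤ p.2) →
    pvNegItems xs fuel = pvIter xs (min fuel ((xs.map Prod.snd).sum.toNat)) := by
  intro fuel
  induction fuel with
  | zero => intro xs _; simp [pvNegItems, pvIter]
  | succ f ih =>
    intro xs h0
    by_cases hxs : xs = []
    · subst hxs; simp [pvNegItems, pvIter]
    · rw [pvNegItems, if_neg hxs]
      by_cases hm : pvMaxSnd xs = 0
      · rw [if_pos hm]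
        have hsum : (xs.map Prod.snd).sum = 0 := by
          apply List.sum_eq_zero
          intro v hv
          rcases List.mem_map.mp hv with ⟨p, hp, rfl⟩
          have := pvMaxSnd_ub xs p hp
          have := h0 p hp
          omega
        rw [hsum]
        simp [pvIter]
      · rw [if_neg hm]
        have hmpos : 0 < pvMaxSnd xs := by
          rcases xs with _ | ⟨x, t⟩
          · exact absurd rfl hxs
          · have := pvMaxSnd_ub (x :: t) x (List.mem_cons_self ..)
            have := h0 x (List.mem_cons_self ..)
            omega
        have hex := pvMaxSnd_exists xs hxs
        have hsum := pvDecF_sum (pvMaxSnd xs) xs hex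
        have hge : pvMaxSnd xs ≤ (xs.map Prod.snd).sum := by
          rcases hex with ⟨p, hp, hpm⟩
          have := List.single_le_sum (l := xs.map Prod.snd)
            (by intro v hv; rcases List.mem_map.mp hv with ⟨q, hq, rfl⟩; exact h0 q hq)
            p.2 (List.mem_map_of_mem hp)
          omega
        have h0' := pvDecF_nonneg (pvMaxSnd xs) hmpos xs h0
        rw [ih _ h0', hsum]
        have : min (f + 1) (xs.map Prod.snd).sum.toNat
            = (min f ((xs.map Prod.snd).sum - 1).toNat) + 1 := by omega
        rw [this, pvIter]


theorem pvIter_succ' (k : Nat) : ∀ (xs : List (String × Int)),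
    pvIter xs (k + 1) = pvDecF (pvMaxSnd (pvIter xs k)) (pvIter xs k) := by
  induction k with
  | zero => intro xs; rfl
  | succ f ih =>
    intro xs
    rw [pvIter, ih, pvIter]


-- ---------- negative branch: the water-level function pvFSum ----------

theorem pvFSum_eq_map (vals : List Int) (L : Int) :
    pvFSum vals L = (vals.map (fun v => if L < v then v - L else 0)).sum := by
  induction vals with
  | nil => simp [pvFSum]
  | cons v t ih =>
    simp only [pvFSum, List.filter_cons, List.map_cons, List.sum_cons] at *
    by_cases h : L < v <;> simp [h, ih] <;> omega


theorem pvFSum_nonneg (vals : List Int) (L : Int) : 0 ≤ pvFSum vals L := by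
  rw [pvFSum_eq_map]
  apply List.sum_nonneg
  intro x hx
  rcases List.mem_map.mp hx with ⟨v, _, rfl⟩
  split <;> omega


theorem pvFSum_diff (vals : List Int) (L : Int) :
    pvFSum vals (L - 1) = pvFSum vals L + (vals.countP (fun v => L ≤ v) : Int) := by
  rw [pvFSum_eq_map, pvFSum_eq_map]
  induction vals with
  | nil => simp
  | cons v t ih =>
    simp only [List.map_cons, List.sum_cons, List.countP_cons]
    by_cases hv : L ≤ v
    · have h1 : L - 1 < v := by omega
      rw [ih]
      simp only [h1, if_true, hv, decide_true, if_pos]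
      push_cast
      by_cases h2 : L < v <;> simp [h2] <;> omega
    · have h1 : ¬(L - 1 < v) := by omega
      have h2 : ¬(L < v) := by omega
      rw [ih]
      simp only [h1, h2, if_false, hv, decide_false]
      push_cast
      omega

theorem pvFSum_antitone (vals : List Int) {L L' : Int} (h : L ≤ L') :
    pvFSum vals L' ≤ pvFSum vals L := by
  rw [pvFSum_eq_map, pvFSum_eq_map]
  induction vals with
  | nil => simp
  | cons v t ih =>
    simp only [List.map_cons, List.sum_cons]
    have : (if L' < v then v - L' else 0) ≤ (if L < v then v - L else 0) := by
      split_ifs <;> omega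
    omega


theorem pvFSum_zero (vals : List Int) (h : ∀ v ∈ vals, 0 ≤ v) :
    pvFSum vals 0 = vals.sum := by
  rw [pvFSum_eq_map]
  induction vals with
  | nil => simp
  | cons v t ih =>
    simp only [List.map_cons, List.sum_cons, List.mem_cons] at *
    have h0 := h v (Or.inl rfl)
    have := ih (fun w hw => h w (Or.inr hw))
    split_ifs <;> omega


theorem pvFSum_top (vals : List Int) (M : Int) (h : ∀ v ∈ vals, v ≤ M) :
    pvFSum vals M = 0 := by
  rw [pvFSum_eq_map]
  apply List.sum_eq_zero
  intro x hx
  rcases List.mem_map.mp hx with ⟨v, hv, rfl⟩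
  have := h v hv
  split <;> omega


theorem pvFSum_eq_zero (vals : List Int) (L : Int) (h : pvFSum vals L = 0) :
    ∀ v ∈ vals, v ≤ L := by
  rw [pvFSum_eq_map] at h
  induction vals with
  | nil => simp
  | cons v t ih =>
    simp only [List.map_cons, List.sum_cons] at h
    have h1 : 0 ≤ (if L < v then v - L else 0) := by split <;> omega
    have h2 : 0 ≤ (t.map (fun v => if L < v then v - L else 0)).sum := by
      apply List.sum_nonneg; intro x hx
      rcases List.mem_map.mp hx with ⟨w, _, rfl⟩; split <;> omega
    intro w hw
    rcases List.mem_cons.mp hw with rfl | hw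
    · by_cases hL : L < w
      · simp [hL] at h1 h; omega
      · omega
    · exact ih (by omega) w hw


theorem pvBSearch_unfold_lt (vals : List Int) (dd lo hi : Int) (h : lo < hi) :
    pvBSearch vals dd lo hi
      = if pvFSum vals (PySem.Int.floordiv (lo + hi) 2) ≤ dd
        then pvBSearch vals dd lo (PySem.Int.floordiv (lo + hi) 2)
        else pvBSearch vals dd (PySem.Int.floordiv (lo + hi) 2 + 1) hi := by
  rw [pvBSearch, dif_pos h]

theorem pvBSearch_unfold_ge (vals : List Int) (dd lo hi : Int) (h : ¬ lo < hi) :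
    pvBSearch vals dd lo hi = lo := by
  rw [pvBSearch, dif_neg h]

theorem pvBSearch_spec (vals : List Int) (dd : Int) : ∀ (lo hi : Int), lo ≤ hi →
    pvFSum vals hi ≤ dd →
    lo ≤ pvBSearch vals dd lo hi ∧ pvBSearch vals dd lo hi ≤ hi ∧
    pvFSum vals (pvBSearch vals dd lo hi) ≤ dd ∧
    ∀ l, lo ≤ l → l < pvBSearch vals dd lo hi → dd < pvFSum vals l := by
  have main : ∀ (m : Nat) (lo hi : Int), (hi - lo).toNat = m → lo ≤ hi →
      pvFSum vals hi ≤ dd →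
      lo ≤ pvBSearch vals dd lo hi ∧ pvBSearch vals dd lo hi ≤ hi ∧
      pvFSum vals (pvBSearch vals dd lo hi) ≤ dd ∧
      ∀ l, lo ≤ l → l < pvBSearch vals dd lo hi → dd < pvFSum vals l := by
    intro m
    induction m using Nat.strong_induction_on with
    | _ m ih =>
      intro lo hi hm hle hhi
      by_cases h : lo < hi
      · have hmid := PySem.Int.floordiv_two_mid_bounds (le_of_lt h)
        have hmlt : PySem.Int.floordiv (lo + hi) 2 < hi :=
          (PySem.Int.floordiv_lt_iff_lt_mul (by omega)).mpr (by omega)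
        rw [pvBSearch_unfold_lt vals dd lo hi h]
        by_cases hF : pvFSum vals (PySem.Int.floordiv (lo + hi) 2) ≤ dd
        · rw [if_pos hF]
          obtain ⟨h1, h2, h3, h4⟩ := ih (PySem.Int.floordiv (lo + hi) 2 - lo).toNat
            (by omega) lo (PySem.Int.floordiv (lo + hi) 2) rfl (by omega) hF
          exact ⟨h1, by omega, h3, h4⟩
        · rw [if_neg hF]
          obtain ⟨h1, h2, h3, h4⟩ := ih (hi - (PySem.Int.floordiv (lo + hi) 2 + 1)).toNat
            (by omega) (PySem.Int.floordiv (lo + hi) 2 + 1) hi rfl (by omega) hhi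
          refine ⟨by omega, h2, h3, ?_⟩
          intro l hl hlt
          by_cases hlm : l ≤ PySem.Int.floordiv (lo + hi) 2
          · have := pvFSum_antitone vals hlm
            omega
          · exact h4 l (by omega) hlt
      · rw [pvBSearch_unfold_ge vals dd lo hi h]
        exact ⟨le_refl _, by omega, by
          have heq : lo = hi := by omega
          rw [heq]; exact hhi, by omega⟩
  intro lo hi
  exact main (hi - lo).toNat lo hi rfl

-- char L d: L is the least level ≥ 0 whose water cost is within d
def pvChar (vals : List Int) (L d : Int) : Prop :=
  0 ≤ L ∧ pvFSum vals L ≤ d ∧ ∀ l, 0 ≤ l → l < L → d < pvFSum vals l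

theorem pvChar_unique (vals : List Int) (L1 L2 d : Int)
    (h1 : pvChar vals L1 d) (h2 : pvChar vals L2 d) : L1 = L2 := by
  obtain ⟨h10, h11, h12⟩ := h1
  obtain ⟨h20, h21, h22⟩ := h2
  by_contra hne
  rcases lt_or_gt_of_ne hne with h | h
  · have := h22 L1 h10 h
    omega
  · have := h12 L2 h20 h
    omega


-- ---------- negative branch: pvAssign step lemmas ----------

theorem pvAssign_congr_nonpos (L : Int) : ∀ (xs : List (String × Int)) (e1 e2 : Int),
    e1 ≤ 0 → e2 ≤ 0 → pvAssign xs L e1 = pvAssign xs L e2 := by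
  intro xs
  induction xs with
  | nil => intro e1 e2 _ _; rfl
  | cons x t ih =>
    intro e1 e2 h1 h2
    obtain ⟨k, v⟩ := x
    simp only [pvAssign]
    by_cases hL : L ≤ v
    · simp only [if_pos hL]
      rw [if_neg (by omega), if_neg (by omega), ih (e1 - 1) (e2 - 1) (by omega) (by omega)]
    · simp only [if_neg hL]
      rw [ih e1 e2 h1 h2]


theorem pvAssign_id (M : Int) : ∀ (xs : List (String × Int)) (e : Int),
    (∀ p ∈ xs, p.2 ≤ M) → e ≤ 0 → pvAssign xs M e = xs := by
  intro xs
  induction xs with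
  | nil => intro e _ _; rfl
  | cons x t ih =>
    intro e hub he
    obtain ⟨k, v⟩ := x
    have hv := hub (k, v) (List.mem_cons_self ..)
    simp only [pvAssign]
    by_cases hL : M ≤ v
    · have : v = M := le_antisymm hv hL
      subst this
      rw [if_pos le_rfl, if_neg (by omega), ih _ (fun p hp => hub p (List.mem_cons_of_mem _ hp)) (by omega)]
    · rw [if_neg hL, ih _ (fun p hp => hub p (List.mem_cons_of_mem _ hp)) he]


theorem pvAssign_le (L : Int) : ∀ (xs : List (String × Int)) (e : Int),
    (∀ p ∈ xs, 0 ≤ p.2) → ∀ p ∈ pvAssign xs L e, p.2 ≤ max L 0 := by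
  intro xs
  induction xs with
  | nil => intro e _ p hp; simp [pvAssign] at hp
  | cons x t ih =>
    intro e h0 p hp
    obtain ⟨k, v⟩ := x
    have hv := h0 (k, v) (List.mem_cons_self ..)
    have ht : ∀ p ∈ t, 0 ≤ p.2 := fun p hp => h0 p (List.mem_cons_of_mem _ hp)
    simp only [pvAssign] at hp
    by_cases hL : L ≤ v
    · rw [if_pos hL] at hp
      rcases List.mem_cons.mp hp with rfl | hp
      · simp only
        split <;> omega
      · exact ih _ ht p hp
    · rw [if_neg hL] at hp
      rcases List.mem_cons.mp hp with rfl | hp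
      · simp only; omega
      · exact ih _ ht p hp


theorem pvAssign_exists (L : Int) : ∀ (xs : List (String × Int)) (e : Int), 0 ≤ e →
    e < (xs.countP (fun p => L ≤ p.2) : Int) → ∃ p ∈ pvAssign xs L e, p.2 = L := by
  intro xs
  induction xs with
  | nil => intro e he hc; simp at hc; omega
  | cons x t ih =>
    intro e he hc
    obtain ⟨k, v⟩ := x
    simp only [List.countP_cons] at hc
    simp only [pvAssign]
    by_cases hL : L ≤ v
    · rw [if_pos hL]
      by_cases he0 : 0 < e
      · have hc' : e - 1 < (t.countP (fun p => L ≤ p.2) : Int) := by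
          simp [hL] at hc; push_cast at hc ⊢; omega
        rcases ih (e - 1) (by omega) hc' with ⟨p, hp, hpe⟩
        exact ⟨p, List.mem_cons_of_mem _ hp, hpe⟩
      · rw [if_neg he0]
        exact ⟨(k, L), List.mem_cons_self .., rfl⟩
    · rw [if_neg hL]
      have hc' : e < (t.countP (fun p => L ≤ p.2) : Int) := by
        simp [hL] at hc; omega
      rcases ih e he hc' with ⟨p, hp, hpe⟩
      exact ⟨p, List.mem_cons_of_mem _ hp, hpe⟩


theorem pv_foldl_max_le (L : Int) : ∀ (t : List (String × Int)) (b : Int), b ≤ L →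
    (∀ p ∈ t, p.2 ≤ L) → t.foldl (fun acc y => max acc y.2) b ≤ L := by
  intro t
  induction t with
  | nil => intro b hb _; exact hb
  | cons z t ih =>
    intro b hb ht
    rw [List.foldl_cons]
    exact ih _ (max_le hb (ht z List.mem_cons_self)) (fun p hp => ht p (List.mem_cons_of_mem _ hp))

theorem pvMaxSnd_eq_of (ys : List (String × Int)) (L : Int)
    (hub : ∀ p ∈ ys, p.2 ≤ L) (hex : ∃ p ∈ ys, p.2 = L) : pvMaxSnd ys = L := by
  rcases ys with _ | ⟨y, t⟩
  · rcases hex with ⟨p, hp, _⟩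
    simp at hp
  · show t.foldl (fun b z => max b z.2) y.2 = L
    have h2 := (PySem.List.le_foldl_max_int t Prod.snd y.2).2
    have hub2 := pv_foldl_max_le L t y.2 (hub y List.mem_cons_self)
      (fun p hp => hub p (List.mem_cons_of_mem _ hp))
    rcases hex with ⟨p, hp, hpe⟩
    rcases List.mem_cons.mp hp with rfl | hp
    · have h1 := (PySem.List.le_foldl_max_int t Prod.snd p.2).1
      omega
    · have := h2 p hp
      omega

theorem pvDecF_assign (L : Int) : ∀ (xs : List (String × Int)) (e : Int), 0 ≤ e →
    pvDecF L (pvAssign xs L e) = pvAssign xs L (e + 1) := by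
  intro xs
  induction xs with
  | nil => intro e _; rfl
  | cons x t ih =>
    intro e he
    obtain ⟨k, v⟩ := x
    simp only [pvAssign]
    by_cases hL : L ≤ v
    · rw [if_pos hL, if_pos hL]
      by_cases he0 : 0 < e
      · rw [if_pos he0, if_pos (by omega)]
        simp only [pvDecF, if_neg (by omega : ¬ (L - 1 = L))]
        rw [ih (e - 1) (by omega), show e - 1 + 1 = e from by omega,
          show e + 1 - 1 = e from by omega]
      · rw [if_neg he0, if_pos (by omega)]
        simp only [pvDecF, eq_self_iff_true, if_true]
        congr 1
        exact pvAssign_congr_nonpos L t (e - 1) (e + 1 - 1) (by omega) (by omega)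
    · rw [if_neg hL, if_neg hL]
      simp only [pvDecF, if_neg (by omega : ¬ (v = L))]
      rw [ih e he]


theorem pvDecF_assign_drop (L : Int) : ∀ (xs : List (String × Int)),
    pvDecF L (pvAssign xs L ((xs.countP (fun p => L ≤ p.2) : Int) - 1))
      = pvAssign xs (L - 1) 0 := by
  intro xs
  induction xs with
  | nil => rfl
  | cons x t ih =>
    obtain ⟨k, v⟩ := x
    have hct : (0:Int) ≤ (t.countP (fun p => L ≤ p.2) : Int) := by positivity
    by_cases hL : L ≤ v
    · have hc : ((List.countP (fun p => decide (L ≤ p.2)) ((k, v) :: t) : Nat) : Int)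
          = (t.countP (fun p => L ≤ p.2) : Int) + 1 := by
        rw [List.countP_cons]
        simp [hL]
      rw [hc]
      simp only [pvAssign, if_pos hL, if_pos (show L - 1 ≤ v from by omega)]
      rw [show (t.countP (fun p => L ≤ p.2) : Int) + 1 - 1
          = (t.countP (fun p => L ≤ p.2) : Int) from by ring]
      by_cases hct0 : 0 < (t.countP (fun p => L ≤ p.2) : Int)
      · rw [if_pos hct0, if_neg (by omega : ¬ (0:Int) < 0)]
        simp only [pvDecF, if_neg (by omega : ¬ (L - 1 = L))]
        rw [ih]
        congr 1
        exact (pvAssign_congr_nonpos (L - 1) t (0 - 1) 0 (by omega) (by omega)).symm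
      · have hc0 : t.countP (fun p => decide (L ≤ p.2)) = 0 := by omega
        have hnone : ∀ p ∈ t, ¬ L ≤ p.2 := by
          intro p hp hle
          have := List.countP_eq_zero.mp hc0 p hp
          simp [hle] at this
        rw [if_neg hct0, if_neg (by omega : ¬ (0:Int) < 0)]
        simp only [pvDecF, eq_self_iff_true, if_true]
        rw [pvAssign_id L t _ (fun p hp => by have := hnone p hp; omega) (by omega)]
        rw [pvAssign_id (L - 1) t _ (fun p hp => by have := hnone p hp; omega) (by omega)]
    · have hc : ((List.countP (fun p => decide (L ≤ p.2)) ((k, v) :: t) : Nat) : Int)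
          = (t.countP (fun p => L ≤ p.2) : Int) := by
        rw [List.countP_cons]
        simp [hL]
      rw [hc]
      simp only [pvAssign, if_neg hL]
      simp only [pvDecF, if_neg (by omega : ¬ (v = L))]
      rw [ih]
      by_cases hv2 : L - 1 ≤ v
      · have hveq : v = L - 1 := by omega
        simp only [pvAssign, if_pos hv2, if_neg (by omega : ¬ (0:Int) < 0)]
        rw [pvAssign_congr_nonpos (L - 1) t (0 - 1) 0 (by omega) (by omega), hveq]
      · simp only [pvAssign, if_neg hv2]


theorem pv_chain (xs : List (String × Int)) (h0 : ∀ p ∈ xs, 0 ≤ p.2) :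
    ∀ (k : Nat), (k : Int) ≤ (xs.map Prod.snd).sum → ∀ L,
    pvChar (xs.map Prod.snd) L (k : Int) →
    pvIter xs k = pvAssign xs L ((k : Int) - pvFSum (xs.map Prod.snd) L) := by
  intro k
  induction k with
  | zero =>
    intro hks L hL
    obtain ⟨hL0, hL1, hL2⟩ := hL
    have hFnn := pvFSum_nonneg (xs.map Prod.snd) L
    have hF0 : pvFSum (xs.map Prod.snd) L = 0 := by omega
    have hub : ∀ p ∈ xs, p.2 ≤ L := by
      intro p hp
      exact pvFSum_eq_zero _ L hF0 p.2 (List.mem_map_of_mem hp)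
    rw [show pvIter xs 0 = xs from rfl]
    rw [show ((0:Nat):Int) - pvFSum (xs.map Prod.snd) L = 0 from by omega]
    rw [pvAssign_id L xs 0 hub (le_refl 0)]
  | succ k ihk =>
    intro hks L' hL'
    have hcast : (((k+1 : Nat)):Int) = (k:Int) + 1 := by push_cast; ring
    rw [hcast] at hL' ⊢
    have hSk : (k:Int) + 1 ≤ (xs.map Prod.snd).sum := by
      rw [← hcast]
      exact hks
    have hS : (0:Int) < (xs.map Prod.snd).sum := by omega
    have hxs : xs ≠ [] := by
      intro h
      rw [h] at hS
      simp at hS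
    have hmax_ub : ∀ v ∈ xs.map Prod.snd, v ≤ pvMaxSnd xs := by
      intro v hv
      rcases List.mem_map.mp hv with ⟨p, hp, rfl⟩
      exact pvMaxSnd_ub xs p hp
    have hmax0 : (0:Int) ≤ pvMaxSnd xs := by
      obtain ⟨p, hp, hpe⟩ := pvMaxSnd_exists xs hxs
      have := h0 p hp
      omega
    have hFtop : pvFSum (xs.map Prod.snd) (pvMaxSnd xs) ≤ (k:Int) := by
      rw [pvFSum_top _ _ hmax_ub]
      positivity
    obtain ⟨hb1, hb2, hb3, hb4⟩ := pvBSearch_spec (xs.map Prod.snd) (k:Int) 0 (pvMaxSnd xs)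
      hmax0 hFtop
    have hchar0 : pvChar (xs.map Prod.snd) (pvBSearch (xs.map Prod.snd) (k:Int) 0 (pvMaxSnd xs))
        (k:Int) := ⟨hb1, hb3, fun l hl hlt => hb4 l hl hlt⟩
    set L0 := pvBSearch (xs.map Prod.snd) (k:Int) 0 (pvMaxSnd xs) with hL0def
    have hIH := ihk (by omega) L0 hchar0
    have hF0S : pvFSum (xs.map Prod.snd) 0 = (xs.map Prod.snd).sum :=
      pvFSum_zero _ (by
        intro v hv
        rcases List.mem_map.mp hv with ⟨p, hp, rfl⟩
        exact h0 p hp)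
    have hL0pos : 1 ≤ L0 := by
      by_contra hc
      have hz : L0 = 0 := by omega
      rw [hz, hF0S] at hb3
      omega
    have hdiff := pvFSum_diff (xs.map Prod.snd) L0
    have hcnt : (k:Int) < pvFSum (xs.map Prod.snd) (L0 - 1) :=
      hchar0.2.2 (L0 - 1) (by omega) (by omega)
    have he0nn : (0:Int) ≤ (k:Int) - pvFSum (xs.map Prod.snd) L0 := by omega
    have hcntP : (xs.countP (fun p => L0 ≤ p.2) : Int)
        = ((xs.map Prod.snd).countP (fun v => L0 ≤ v) : Int) := by
      rw [List.countP_map]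
      rfl
    have he0lt : (k:Int) - pvFSum (xs.map Prod.snd) L0
        < (xs.countP (fun p => L0 ≤ p.2) : Int) := by
      rw [hcntP]
      omega
    have hassign_ex := pvAssign_exists L0 xs _ he0nn he0lt
    have hmax_assign :
        pvMaxSnd (pvAssign xs L0 ((k:Int) - pvFSum (xs.map Prod.snd) L0)) = L0 := by
      apply pvMaxSnd_eq_of _ L0 ?_ hassign_ex
      intro p hp
      have := pvAssign_le L0 xs _ h0 p hp
      omega
    rw [pvIter_succ' k xs, hIH, hmax_assign]
    by_cases hcase : (k:Int) + 1 < pvFSum (xs.map Prod.snd) (L0 - 1)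
    · rw [pvDecF_assign L0 xs _ he0nn]
      have hchar1 : pvChar (xs.map Prod.snd) L0 ((k:Int) + 1) :=
        ⟨hb1, by omega, fun l hl hlt => by
          have := pvFSum_antitone (xs.map Prod.snd) (show l ≤ L0 - 1 from by omega)
          omega⟩
      rw [pvChar_unique (xs.map Prod.snd) L' L0 ((k:Int) + 1) hL' hchar1]
      congr 1
      omega
    · have hFeq : pvFSum (xs.map Prod.snd) (L0 - 1) = (k:Int) + 1 := by omega
      rw [show (k:Int) - pvFSum (xs.map Prod.snd) L0
          = (xs.countP (fun p => L0 ≤ p.2) : Int) - 1 from by rw [hcntP]; omega]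
      rw [pvDecF_assign_drop L0 xs]
      have hchar1 : pvChar (xs.map Prod.snd) (L0 - 1) ((k:Int) + 1) := by
        refine ⟨by omega, by omega, ?_⟩
        intro l hl hlt
        have hd2 := pvFSum_diff (xs.map Prod.snd) (L0 - 1)
        have hcnt2 : ((xs.map Prod.snd).countP (fun v => L0 ≤ v) : Int)
            ≤ ((xs.map Prod.snd).countP (fun v => L0 - 1 ≤ v) : Int) := by
          exact_mod_cast List.countP_mono_left (by
            intro v _ h
            simp only [decide_eq_true_eq] at h ⊢
            omega)
        have hanti := pvFSum_antitone (xs.map Prod.snd)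
          (show l ≤ L0 - 1 - 1 from by omega)
        omega
      rw [pvChar_unique (xs.map Prod.snd) L' (L0 - 1) ((k:Int) + 1) hL' hchar1]
      congr 1
      omega


theorem pv_branches (D : PySem.Dict String Int) (total : Int)
    (hnd : D.keys.Nodup) (hnn : ∀ p ∈ D.items, 0 ≤ p.2)
    (hpre : D.items = [] → 0 ≤ total - D.values.sum) :
    (if total - D.values.sum = 0 then D.items
     else if 0 < total - D.values.sum then
       (if D.keys = [] then D.items
        else (pvPosLoopA D D.keys (total - D.values.sum).toNat 0).items)
     else (pvNegLoopA D (-(total - D.values.sum)).toNat).items)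
    =
    (if total - D.values.sum = 0 ∨ D.items = [] then D.items
     else if 0 < total - D.values.sum then
       D.items.zipIdx.map (fun p => (p.1.1,
         p.1.2 + PySem.Int.floordiv (total - D.values.sum) (D.size : Int)
           + if (p.2 : Int) < PySem.Int.mod (total - D.values.sum) (D.size : Int)
             then 1 else 0))
     else match D.values with
       | [] => D.items
       | v0 :: vt =>
         pvAssign D.items
           (pvBSearch (v0 :: vt) (min (-(total - D.values.sum)) D.values.sum) 0
             (vt.foldl max v0))
           (min (-(total - D.values.sum)) D.values.sum
             - pvFSum (v0 :: vt)
                 (pvBSearch (v0 :: vt) (min (-(total - D.values.sum)) D.values.sum) 0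
                   (vt.foldl max v0)))) := by
  have hvalsmap : D.values = D.items.map Prod.snd := rfl
  have hkeysmap : D.keys = D.items.map Prod.fst := rfl
  by_cases h0 : total - D.values.sum = 0
  · rw [if_pos h0, if_pos (Or.inl h0)]
  · rw [if_neg h0]
    by_cases hempty : D.items = []
    · rw [if_pos (Or.inr hempty)]
      have hkeys : D.keys = [] := by rw [hkeysmap, hempty]; rfl
      by_cases hpos : 0 < total - D.values.sum
      · rw [if_pos hpos, if_pos hkeys]
      · have := hpre hempty
        omega
    · rw [if_neg (not_or.mpr ⟨h0, hempty⟩)]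
      have hkne : D.keys ≠ [] := by
        rw [hkeysmap]
        simpa using hempty
      have hlenpos : 0 < D.keys.length := List.length_pos_of_ne_nil hkne
      by_cases hpos : 0 < total - D.values.sum
      · -- positive delta: round robin = quotient/remainder
        rw [if_pos hpos, if_pos hpos, if_neg hkne]
        have hmod0 : PySem.Int.mod 0 (D.keys.length : Int) = 0 := by
          rw [PySem.Int.mod_eq_emod_of_pos (by omega)]
          simp
        set N := (total - D.values.sum).toNat with hN
        have hmain := pvPosLoopA_main D.keys hnd hkne
          (N / D.keys.length) (N % D.keys.length)
          (Nat.mod_lt _ hlenpos) D 0 rfl (le_refl 0) hmod0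
        rw [show N = N / D.keys.length * D.keys.length + N % D.keys.length from by
          rw [Nat.mul_comm]
          exact (Nat.div_add_mod _ _).symm]
        rw [hmain]
        have hsz : (D.size : Int) = (D.keys.length : Int) := by
          rw [hkeysmap]
          simp [PySem.Dict.size]
        have hdd : total - D.values.sum = ((N : Nat) : Int) := by omega
        have hq : PySem.Int.floordiv (total - D.values.sum) (D.size : Int)
            = ((N / D.keys.length : Nat) : Int) := by
          rw [hsz, hdd, PySem.Int.floordiv_natCast]
        have hr : PySem.Int.mod (total - D.values.sum) (D.size : Int)
            = ((N % D.keys.length : Nat) : Int) := by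
          rw [hsz, hdd, PySem.Int.mod_natCast]
        rw [hq, hr]
      · -- negative delta: unit decrements = water level
        rw [if_neg hpos, if_neg hpos]
        have hvne : D.values ≠ [] := by
          rw [hvalsmap]
          simpa using hempty
        obtain ⟨v0, vt, hv⟩ : ∃ v0 vt, D.values = v0 :: vt := by
          rcases hvv : D.values with _ | ⟨a, b⟩
          · exact absurd hvv hvne
          · exact ⟨a, b, rfl⟩
        have hmapsnd : D.items.map Prod.snd = v0 :: vt := by
          rw [← hvalsmap]
          exact hv
        rw [hv]
        have hneg : total - (v0 :: vt).sum < 0 := by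
          rw [← hv]
          omega
        have hvnn : ∀ v ∈ (v0 :: vt), (0:Int) ≤ v := by
          intro v hvm
          rw [← hmapsnd] at hvm
          rcases List.mem_map.mp hvm with ⟨p, hp, rfl⟩
          exact hnn p hp
        have hs0 : (0:Int) ≤ (v0 :: vt).sum := List.sum_nonneg hvnn
        have hub : ∀ v ∈ v0 :: vt, v ≤ vt.foldl max v0 := by
          intro v hvm
          obtain ⟨hh, ht⟩ := PySem.List.le_foldl_max vt v0
          rcases List.mem_cons.mp hvm with rfl | hvm
          · exact hh
          · exact ht v hvm
        have hhi0 : (0:Int) ≤ vt.foldl max v0 := by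
          have h00 : (0:Int) ≤ v0 := hvnn v0 List.mem_cons_self
          have := (PySem.List.le_foldl_max vt v0).1
          omega
        have hddnn : (0:Int) ≤ min (-(total - (v0 :: vt).sum)) (v0 :: vt).sum := by omega
        have hFhi : pvFSum (v0 :: vt) (vt.foldl max v0)
            ≤ min (-(total - (v0 :: vt).sum)) (v0 :: vt).sum := by
          rw [pvFSum_top _ _ hub]
          omega
        obtain ⟨hb1, hb2, hb3, hb4⟩ := pvBSearch_spec (v0 :: vt)
          (min (-(total - (v0 :: vt).sum)) (v0 :: vt).sum) 0 (vt.foldl max v0) hhi0 hFhi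
        have hcast : (((min (-(total - (v0 :: vt).sum)) (v0 :: vt).sum).toNat : Nat) : Int)
            = min (-(total - (v0 :: vt).sum)) (v0 :: vt).sum := by omega
        have hchar : pvChar (D.items.map Prod.snd)
            (pvBSearch (v0 :: vt) (min (-(total - (v0 :: vt).sum)) (v0 :: vt).sum) 0
              (vt.foldl max v0))
            (((min (-(total - (v0 :: vt).sum)) (v0 :: vt).sum).toNat : Nat) : Int) := by
          rw [hmapsnd, hcast]
          exact ⟨hb1, hb3, hb4⟩
        have hchain := pv_chain D.items hnn
          (min (-(total - (v0 :: vt).sum)) (v0 :: vt).sum).toNat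
          (by rw [hmapsnd]; omega) _ hchar
        rw [pvNegLoopA_items _ D hnd, pvNegItems_eq_iter _ _ hnn]
        rw [show min (-(total - (v0 :: vt).sum)).toNat ((D.items.map Prod.snd).sum.toNat)
            = (min (-(total - (v0 :: vt).sum)) (v0 :: vt).sum).toNat from by
          rw [hmapsnd]; omega]
        rw [hchain, hmapsnd, hcast]

-- ===== VERDICT (by name: the statement is the Claim_ definition above) =====
theorem normalize_counts_py_spec : Claim_equal_normalize_counts_py := by
  intro counts total _ hpre
  show normalize_counts_py counts total = normalize_counts_py_alt counts total
  have hnd := pv_clamp_nodup counts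
  have hnn := pv_clamp_nonneg counts
  refine pv_branches _ total hnd hnn ?_
  intro hempty
  by_cases hc : counts = []
  · have h1 := hpre hc
    subst hc
    show (0:Int) ≤ total - (PySem.Dict.empty : PySem.Dict String Int).values.sum
    simp [PySem.Dict.empty, PySem.Dict.values]
    omega
  · exact absurd hempty (pv_clamp_ne_nil counts hc)
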